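-- pv_equiv track=rewrite | github.com/underloki/Cyprium | kernel/stegano/text/alphaspaces.py | _get_spaces
-- ===== SOURCE A (Python) =====
-- def _get_spaces(text):
--     ret = []
--     curr = 0
--     for c in text:
--         if c == ' ':
--             curr += 1
--         elif curr:
--             ret.append(curr)
--             curr = 0
--     return ret
-- ===== SOURCE B (Python) =====
-- def _get_spaces(text):
--     # positions of non-space characters; gaps between consecutive ones
--     # (and before the first) are exactly the space runs A counts.
--     pos = [i for i, c in enumerate(text) if c != ' ']
--     return [b - a - 1 for a, b in zip([-1] + pos, pos) if b - a > 1]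
-- ===== Notes on version B (the rewrite author's own statement) =====
-- stated objective: alternative
-- what changed: Replaces the running space-counter loop with a position-based formulation: collect the indices of non-space characters, then emit the positive gaps between consecutive indices (a trailing run has no following index and so is dropped automatically).
import Mathlib
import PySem

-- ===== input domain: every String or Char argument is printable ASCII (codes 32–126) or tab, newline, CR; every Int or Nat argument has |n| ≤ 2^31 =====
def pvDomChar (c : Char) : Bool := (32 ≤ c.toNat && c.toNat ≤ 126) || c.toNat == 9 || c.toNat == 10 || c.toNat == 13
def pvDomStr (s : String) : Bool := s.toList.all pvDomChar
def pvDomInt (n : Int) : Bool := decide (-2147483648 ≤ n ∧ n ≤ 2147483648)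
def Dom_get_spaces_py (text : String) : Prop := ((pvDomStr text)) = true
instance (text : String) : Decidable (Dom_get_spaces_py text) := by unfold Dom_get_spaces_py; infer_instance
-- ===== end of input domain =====

-- B replaces A's running space-counter with gaps between consecutive non-space positions (alternative formulation, same cost).

-- ===== PORT A =====
-- A: one pass, accumulating a counter `curr` of spaces, flushed to `ret` at each non-space.
def get_spaces_py (text : String) : List Int :=
  (text.toList.foldl
    (fun (st : List Int × Int) c =>
      if c = ' ' then (st.1, st.2 + 1)
      else if st.2 ≠ 0 then (st.1 ++ [st.2], 0)
      else st)
    ([], 0)).1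

-- ===== PORT B =====
-- B: positions of non-space chars (enumerate + comprehension), then positive gaps between consecutive positions.
def get_spaces_py_alt (text : String) : List Int :=
  let pos : List Int :=
    (PySem.List.enumerate text.toList 0).filterMap
      (fun p => if p.2 ≠ ' ' then some p.1 else none)
  (((-1 : Int) :: pos).zip pos).filterMap
    (fun ab => if ab.2 - ab.1 > 1 then some (ab.2 - ab.1 - 1) else none)

-- ===== PRECONDITION & SPEC =====
def Spec_get_spaces_py (text : String) (out : List Int) : Prop := out = get_spaces_py_alt text
instance (text : String) (out : List Int) : Decidable (Spec_get_spaces_py text out) := by unfold Spec_get_spaces_py; infer_instance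

-- ===== CLAIM (what is proved, stated in full; the proofs are below) =====
def Claim_equal_get_spaces_py : Prop := ∀ (text : String), Dom_get_spaces_py text → Spec_get_spaces_py text (get_spaces_py text)

-- ===== LEMMAS AND PROOFS =====

-- reference recursion equal to A's loop body (ret-prefix factored out)
def gsRun (curr : Int) : List Char → List Int
  | [] => []
  | c :: cs =>
    if c = ' ' then gsRun (curr + 1) cs
    else if curr ≠ 0 then curr :: gsRun 0 cs
    else gsRun 0 cs

lemma foldl_eq_gsRun (l : List Char) : ∀ (acc : List Int) (curr : Int),
    (l.foldl
      (fun (st : List Int × Int) c =>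
        if c = ' ' then (st.1, st.2 + 1)
        else if st.2 ≠ 0 then (st.1 ++ [st.2], 0)
        else st)
      (acc, curr)).1 = acc ++ gsRun curr l := by
  induction l with
  | nil => intro acc curr; simp [gsRun]
  | cons c cs ih =>
    intro acc curr
    simp only [List.foldl_cons]
    by_cases hc : c = ' '
    · rw [if_pos hc, ih]
      simp [gsRun, hc]
    · rw [if_neg hc]
      by_cases hz : curr = 0
      · rw [if_neg (not_not_intro hz), ih]
        simp [gsRun, hc, hz]
      · rw [if_pos hz, ih]
        simp [gsRun, hc, hz]

-- positions of non-space chars, indices starting at i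
def gsPos (i : Int) : List Char → List Int
  | [] => []
  | c :: cs => if c ≠ ' ' then i :: gsPos (i + 1) cs else gsPos (i + 1) cs

-- gaps between consecutive positions (prev = p)
def gsGaps (p : Int) : List Int → List Int
  | [] => []
  | q :: qs => (if q - p > 1 then [q - p - 1] else []) ++ gsGaps q qs

lemma zip_filterMap_eq_gsGaps (ps : List Int) : ∀ (p : Int),
    ((p :: ps).zip ps).filterMap
      (fun ab => if ab.2 - ab.1 > 1 then some (ab.2 - ab.1 - 1) else none)
    = gsGaps p ps := by
  induction ps with
  | nil => intro p; simp [gsGaps]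
  | cons q qs ih =>
    intro p
    by_cases h : q - p > 1 <;> simp [gsGaps, h, ih]

lemma enumerate_filterMap_eq_gsPos (l : List Char) : ∀ (i : Int),
    (PySem.List.enumerate l i).filterMap
      (fun p => if p.2 ≠ ' ' then some p.1 else none)
    = gsPos i l := by
  induction l with
  | nil => intro i; simp [PySem.List.enumerate_nil, gsPos]
  | cons c cs ih =>
    intro i
    have hfun : (fun x : Int × Char => if x.2 = ' ' then none else some x.1)
        = (fun p : Int × Char => if p.2 ≠ ' ' then some p.1 else none) := by
      funext x; by_cases hx : x.2 = ' ' <;> simp [hx]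
    by_cases h : c = ' ' <;>
      simp [PySem.List.enumerate_cons, gsPos, h] <;> rw [hfun] <;> exact ih (i + 1)

-- key invariant: gaps after prev p equal A's run recursion with curr = i - p - 1
lemma gsGaps_gsPos (l : List Char) : ∀ (i p : Int), p < i →
    gsGaps p (gsPos i l) = gsRun (i - p - 1) l := by
  induction l with
  | nil => intro i p _; simp [gsPos, gsGaps, gsRun]
  | cons c cs ih =>
    intro i p hp
    by_cases hc : c = ' '
    · have : gsRun (i - p - 1) (c :: cs) = gsRun (i + 1 - p - 1) cs := by
        simp [gsRun, hc]; ring_nf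
      rw [this, gsPos]
      simp [hc]
      exact ih (i + 1) p (by omega)
    · rw [gsPos]
      simp only [hc, ne_eq, not_false_eq_true, if_pos]
      rw [gsGaps]
      by_cases hz : i - p > 1
      · have hz' : i - p - 1 ≠ 0 := by omega
        simp [gsRun, hc, hz, hz']
        have := ih (i + 1) i (by omega)
        simpa using this
      · have hz' : ¬ (i - p - 1 ≠ 0) := by omega
        simp [gsRun, hc, hz, hz']
        have := ih (i + 1) i (by omega)
        simpa using this

-- ===== VERDICT (by name: the statement is the Claim_ definition above) =====
theorem get_spaces_py_spec : Claim_equal_get_spaces_py := by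
  intro text _
  unfold Spec_get_spaces_py get_spaces_py get_spaces_py_alt
  rw [foldl_eq_gsRun, enumerate_filterMap_eq_gsPos, zip_filterMap_eq_gsGaps]
  have h := gsGaps_gsPos text.toList 0 (-1) (by omega)
  simpa using h.symm
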